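-- pv_equiv track=rewrite | github.com/pypi-data/pypi-mirror-321 | packages/ScaleNx/scalenx-2025.1.19.tar.gz/scalenx-2025.1.19/scalenx/scalenx.py | scale3x
-- ===== SOURCE A (Python) =====
-- def scale3x(image3d: list[list[list[int]]]) -> list[list[list[int]]]:
--     """Scale3x image rescale
--     -
--
--     `EPXImage = scalenx.scale3x(image3d)`
--
--     Takes `image3d` as 3D nested list (image) of lists (rows) of lists (pixels) of int (channel values), and performs Scale3x rescaling, returning scaled EPXImage of similar structure.
--
--     """
--
--     # determining image size from list
--     Y = len(image3d)
--     X = len(image3d[0])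
--
--     # building new list
--     EPXImage = list()
--
--     for y in range(0, Y, 1):
--         RowRez = list()
--         RowDvo = list()
--         RowTre = list()
--         for x in range(0, X, 1):
--             """ Source around default pixel E
--                 ┌───┬───┬───┐
--                 │ A │ B │ C │
--                 ├───┼───┼───┤
--                 │ D │ E │ F │
--                 ├───┼───┼───┤
--                 │ G │ H │ I │
--                 └───┴───┴───┘
--             """
--
--             E = image3d[y][x]  # E is a center of 3x3 square
--
--             A = image3d[max(y - 1, 0)][max(x - 1, 0)]
--             B = image3d[max(y - 1, 0)][x]
--             C = image3d[max(y - 1, 0)][min(x + 1, X - 1)]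
--
--             D = image3d[y][max(x - 1, 0)]
--             # central pixel E = image3d[y][x] retrieved already
--             F = image3d[y][min(x + 1, X - 1)]
--
--             G = image3d[min(y + 1, Y - 1)][max(x - 1, 0)]
--             H = image3d[min(y + 1, Y - 1)][x]
--             I = image3d[min(y + 1, Y - 1)][min(x + 1, X - 1)]
--
--             """ Result
--                 ┌────┬────┬────┐
--                 │ r1 │ r2 │ r3 │
--                 ├────┼────┼────┤
--                 │ r4 │ r5 │ r6 │
--                 ├────┼────┼────┤
--                 │ r7 │ r8 │ r9 │
--                 └────┴────┴────┘
--             """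
--
--             r1 = r2 = r3 = r4 = r5 = r6 = r7 = r8 = r9 = E
--
--             if B != H and D != F:
--                 if D == B:
--                     r1 = D
--                 if (D == B and E != C) or (B == F and E != A):
--                     r2 = B
--                 if B == F:
--                     r3 = F
--                 if (D == B and E != G) or (D == H and E != A):
--                     r4 = D
--                 # central pixel r5 = E set already
--                 if (B == F and E != I) or (H == F and E != C):
--                     r6 = F
--                 if D == H:
--                     r7 = D
--                 if (D == H and E != I) or (H == F and E != G):
--                     r8 = H
--                 if H == F:
--                     r9 = F
--
--             RowRez.extend([r1, r2, r3])
--             RowDvo.extend([r4, r5, r6])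
--             RowTre.extend([r7, r8, r9])
--
--         EPXImage.append(RowRez)
--         EPXImage.append(RowDvo)
--         EPXImage.append(RowTre)
--
--     return EPXImage  # rescaling three times finished
-- ===== SOURCE B (Python) =====
-- def _rot(n):
--     # rotate the 3x3 neighborhood 90 degrees clockwise
--     A, B, C, D, E, F, G, H, I = n
--     return (G, D, A, H, E, B, I, F, C)
--
--
-- def _corner(A, B, C, D, E, F, G, H, I):
--     # top-left corner and top edge of the Scale3x block for this orientation
--     c = D if D == B else E
--     e = B if (D == B and E != C) or (B == F and E != A) else E
--     return c, e
--
--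
-- def _win(seq):
--     # sliding 3-windows with replicated borders: element x is
--     # (seq[x-1] clamped, seq[x], seq[x+1] clamped)
--     return list(zip(seq[:1] + seq[:-1], seq, seq[1:] + seq[-1:]))
--
--
-- def scale3x(image3d: list[list[list[int]]]) -> list[list[list[int]]]:
--     X = len(image3d[0])
--     grid = [row[:X] for row in image3d]
--     out = []
--     for up, mid, dn in _win(grid):
--         top, ctr, bot = [], [], []
--         for (A, B, C), (D, E, F), (G, H, I) in zip(_win(up), _win(mid), _win(dn)):
--             if B != H and D != F:
--                 n = (A, B, C, D, E, F, G, H, I)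
--                 r1, r2 = _corner(*n)
--                 n = _rot(n)
--                 r7, r4 = _corner(*n)
--                 n = _rot(n)
--                 r9, r8 = _corner(*n)
--                 n = _rot(n)
--                 r3, r6 = _corner(*n)
--             else:
--                 r1 = r2 = r3 = r4 = r6 = r7 = r8 = r9 = E
--             top += [r1, r2, r3]
--             ctr += [r4, E, r6]
--             bot += [r7, r8, r9]
--         out += [top, ctr, bot]
--     return out
-- ===== Notes on version B (the rewrite author's own statement) =====
-- stated objective: alternative
-- what changed: B exploits the 4-fold rotational symmetry of the Scale3x rule: a single corner/edge rule applied to the neighborhood and its three 90-degree rotations replaces A's nine-branch block, and neighborhoods are produced by zip-based sliding windows over border-replicated row/column sequences instead of per-pixel clamped max/min indexing.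
import Mathlib
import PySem

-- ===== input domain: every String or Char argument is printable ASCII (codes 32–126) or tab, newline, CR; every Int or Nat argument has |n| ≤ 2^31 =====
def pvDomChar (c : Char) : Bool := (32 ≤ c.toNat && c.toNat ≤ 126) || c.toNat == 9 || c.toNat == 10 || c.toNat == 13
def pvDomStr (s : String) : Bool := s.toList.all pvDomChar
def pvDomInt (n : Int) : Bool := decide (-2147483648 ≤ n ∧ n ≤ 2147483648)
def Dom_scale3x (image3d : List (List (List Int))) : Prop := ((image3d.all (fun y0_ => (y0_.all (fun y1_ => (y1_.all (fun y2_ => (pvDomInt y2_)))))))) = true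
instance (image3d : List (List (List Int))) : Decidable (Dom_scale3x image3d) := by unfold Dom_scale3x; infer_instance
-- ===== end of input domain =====

-- B replaces A's nine-branch per-pixel block by a single corner/edge rule applied to the
-- neighborhood and its three 90-degree rotations, and produces neighborhoods by zip-based
-- sliding windows over border-replicated sequences (alternative decomposition, same cost).


-- ===== PORT A =====
def scale3x (image3d : List (List (List Int))) : List (List (List Int)) :=
  let Y : Int := PySem.List.len image3d
  let X : Int := PySem.List.len (PySem.List.pyGetD image3d 0 [])
  (PySem.List.pyRange 0 Y 1).foldl (fun EPXImage y =>
    let rows :=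
      (PySem.List.pyRange 0 X 1).foldl
        (fun (st : List (List Int) × List (List Int) × List (List Int)) x =>
          let E := PySem.List.pyGetD (PySem.List.pyGetD image3d y []) x []
          let A := PySem.List.pyGetD (PySem.List.pyGetD image3d (max (y-1) 0) []) (max (x-1) 0) []
          let B := PySem.List.pyGetD (PySem.List.pyGetD image3d (max (y-1) 0) []) x []
          let C := PySem.List.pyGetD (PySem.List.pyGetD image3d (max (y-1) 0) []) (min (x+1) (X-1)) []
          let D := PySem.List.pyGetD (PySem.List.pyGetD image3d y []) (max (x-1) 0) []
          let F := PySem.List.pyGetD (PySem.List.pyGetD image3d y []) (min (x+1) (X-1)) []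
          let G := PySem.List.pyGetD (PySem.List.pyGetD image3d (min (y+1) (Y-1)) []) (max (x-1) 0) []
          let H := PySem.List.pyGetD (PySem.List.pyGetD image3d (min (y+1) (Y-1)) []) x []
          let I := PySem.List.pyGetD (PySem.List.pyGetD image3d (min (y+1) (Y-1)) []) (min (x+1) (X-1)) []
          let r1 := E; let r2 := E; let r3 := E; let r4 := E; let r5 := E
          let r6 := E; let r7 := E; let r8 := E; let r9 := E
          let res :=
            if B ≠ H ∧ D ≠ F then
              (if D = B then D else r1,
               if (D = B ∧ E ≠ C) ∨ (B = F ∧ E ≠ A) then B else r2,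
               if B = F then F else r3,
               if (D = B ∧ E ≠ G) ∨ (D = H ∧ E ≠ A) then D else r4,
               if (B = F ∧ E ≠ I) ∨ (H = F ∧ E ≠ C) then F else r6,
               if D = H then D else r7,
               if (D = H ∧ E ≠ I) ∨ (H = F ∧ E ≠ G) then H else r8,
               if H = F then F else r9)
            else (r1, r2, r3, r4, r6, r7, r8, r9)
          (st.1 ++ [res.1, res.2.1, res.2.2.1],
           st.2.1 ++ [res.2.2.2.1, r5, res.2.2.2.2.1],
           st.2.2 ++ [res.2.2.2.2.2.1, res.2.2.2.2.2.2.1, res.2.2.2.2.2.2.2]))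
        ([], [], [])
    EPXImage ++ [rows.1] ++ [rows.2.1] ++ [rows.2.2]) []

-- ===== PORT B =====
-- neighborhood tuple (A,B,C,D,E,F,G,H,I), its clockwise rotation, and the corner/edge rule
def pvRot : (List Int × List Int × List Int × List Int × List Int × List Int × List Int × List Int × List Int) →
    (List Int × List Int × List Int × List Int × List Int × List Int × List Int × List Int × List Int)
  | (A, B, C, D, E, F, G, H, I) => (G, D, A, H, E, B, I, F, C)

def pvCorner : (List Int × List Int × List Int × List Int × List Int × List Int × List Int × List Int × List Int) →
    (List Int × List Int)
  | (A, B, C, D, E, F, _G, _H, _I) =>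
      (if D = B then D else E,
       if (D = B ∧ E ≠ C) ∨ (B = F ∧ E ≠ A) then B else E)

-- the body of Source B's inner loop: gate, then the corner rule on the four rotations
def pvBlock (w : (List Int × List Int × List Int) × (List Int × List Int × List Int) × (List Int × List Int × List Int)) :
    List (List Int) × List (List Int) × List (List Int) :=
  match w with
  | ((A, B, C), (D, E, F), (G, H, I)) =>
    if B ≠ H ∧ D ≠ F then
      let n0 := (A, B, C, D, E, F, G, H, I)
      let p1 := pvCorner n0          -- (r1, r2)
      let n1 := pvRot n0
      let p2 := pvCorner n1          -- (r7, r4)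
      let n2 := pvRot n1
      let p3 := pvCorner n2          -- (r9, r8)
      let n3 := pvRot n2
      let p4 := pvCorner n3          -- (r3, r6)
      ([p1.1, p1.2, p4.1], [p2.2, E, p4.2], [p2.1, p3.2, p3.1])
    else ([E, E, E], [E, E, E], [E, E, E])

def pvZip3 {α β γ : Type} (xs : List α) (ys : List β) (zs : List γ) : List (α × β × γ) :=
  List.zipWith (fun a bc => (a, bc)) xs (List.zipWith Prod.mk ys zs)

-- zip(seq[:1]+seq[:-1], seq, seq[1:]+seq[-1:]) : border-replicated sliding 3-windows
def pvWin {α : Type} (seq : List α) : List (α × α × α) :=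
  pvZip3 (PySem.List.slice seq none (some 1) ++ PySem.List.slice seq none (some (-1)))
         seq
         (PySem.List.slice seq (some 1) none ++ PySem.List.slice seq (some (-1)) none)

def scale3x_alt (image3d : List (List (List Int))) : List (List (List Int)) :=
  let X : Int := PySem.List.len (PySem.List.pyGetD image3d 0 [])
  let grid := image3d.map (fun row => PySem.List.slice row none (some X))
  (pvWin grid).foldl (fun out t =>
    let rows :=
      (pvZip3 (pvWin t.1) (pvWin t.2.1) (pvWin t.2.2)).foldl
        (fun (st : List (List Int) × List (List Int) × List (List Int)) w =>
          let b := pvBlock w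
          (st.1 ++ b.1, st.2.1 ++ b.2.1, st.2.2 ++ b.2.2))
        ([], [], [])
    out ++ [rows.1, rows.2.1, rows.2.2]) []

-- ===== PRECONDITION & SPEC =====
-- Pre_ excludes exactly the inputs on which Python A raises IndexError: the empty image
-- (image3d[0] fails) and jagged images where some row is shorter than row 0
-- (image3d[y][x] fails there); on every other input A returns normally.
def Pre_scale3x (image3d : List (List (List Int))) : Prop :=
  image3d ≠ [] ∧ ∀ r ∈ image3d, (image3d.headD []).length ≤ r.length
instance (image3d : List (List (List Int))) : Decidable (Pre_scale3x image3d) := by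
  unfold Pre_scale3x; infer_instance
def pvWitness_scale3x : List (List (List Int)) := [[[0, 1], [2, 3]], [[4, 5], [0, 1]]]

def Spec_scale3x (image3d : List (List (List Int))) (out : List (List (List Int))) : Prop := out = scale3x_alt image3d
instance (image3d : List (List (List Int))) (out : List (List (List Int))) : Decidable (Spec_scale3x image3d out) := by unfold Spec_scale3x; infer_instance

-- ===== CLAIM (what is proved, stated in full; the proofs are below) =====
def Claim_equal_scale3x : Prop := ∀ (image3d : List (List (List Int))), Dom_scale3x image3d → Pre_scale3x image3d → Spec_scale3x image3d (scale3x image3d)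

-- ===== LEMMAS AND PROOFS =====

theorem pv_foldl_app3 {α β : Type} (f1 f2 f3 : α → β) (l : List α) (acc : List β) :
    l.foldl (fun a y => a ++ [f1 y] ++ [f2 y] ++ [f3 y]) acc
      = acc ++ l.flatMap (fun y => [f1 y, f2 y, f3 y]) := by
  induction l generalizing acc with
  | nil => simp
  | cons h t ih => simp [List.flatMap_def]

theorem pv_foldl_app3' {α β : Type} (f1 f2 f3 : α → β) (l : List α) (acc : List β) :
    l.foldl (fun a y => a ++ [f1 y, f2 y, f3 y]) acc
      = acc ++ l.flatMap (fun y => [f1 y, f2 y, f3 y]) := by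
  induction l generalizing acc with
  | nil => simp
  | cons h t ih => simp [ih, List.flatMap_def]

theorem pv_foldl_triple {α β : Type} (f1 f2 f3 : α → List β) (l : List α) (a b c : List β) :
    l.foldl (fun st x => (st.1 ++ f1 x, st.2.1 ++ f2 x, st.2.2 ++ f3 x)) (a, b, c)
      = (a ++ l.flatMap f1, b ++ l.flatMap f2, c ++ l.flatMap f3) := by
  induction l generalizing a b c with
  | nil => simp
  | cons h t ih => simp [ih, List.flatMap_def]

-- A's nine-branch kernel, as a tuple of the three output rows
def pvKernelA (A B C D E F G H I : List Int) :
    List (List Int) × List (List Int) × List (List Int) :=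
  if B ≠ H ∧ D ≠ F then
    ([if D = B then D else E,
      if (D = B ∧ E ≠ C) ∨ (B = F ∧ E ≠ A) then B else E,
      if B = F then F else E],
     [if (D = B ∧ E ≠ G) ∨ (D = H ∧ E ≠ A) then D else E,
      E,
      if (B = F ∧ E ≠ I) ∨ (H = F ∧ E ≠ C) then F else E],
     [if D = H then D else E,
      if (D = H ∧ E ≠ I) ∨ (H = F ∧ E ≠ G) then H else E,
      if H = F then F else E])
  else ([E, E, E], [E, E, E], [E, E, E])

def nineA (img : List (List (List Int))) (y x : Int) :
    List (List Int) × List (List Int) × List (List Int) :=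
  let Y : Int := PySem.List.len img
  let X : Int := PySem.List.len (PySem.List.pyGetD img 0 [])
  pvKernelA
    (PySem.List.pyGetD (PySem.List.pyGetD img (max (y-1) 0) []) (max (x-1) 0) [])
    (PySem.List.pyGetD (PySem.List.pyGetD img (max (y-1) 0) []) x [])
    (PySem.List.pyGetD (PySem.List.pyGetD img (max (y-1) 0) []) (min (x+1) (X-1)) [])
    (PySem.List.pyGetD (PySem.List.pyGetD img y []) (max (x-1) 0) [])
    (PySem.List.pyGetD (PySem.List.pyGetD img y []) x [])
    (PySem.List.pyGetD (PySem.List.pyGetD img y []) (min (x+1) (X-1)) [])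
    (PySem.List.pyGetD (PySem.List.pyGetD img (min (y+1) (Y-1)) []) (max (x-1) 0) [])
    (PySem.List.pyGetD (PySem.List.pyGetD img (min (y+1) (Y-1)) []) x [])
    (PySem.List.pyGetD (PySem.List.pyGetD img (min (y+1) (Y-1)) []) (min (x+1) (X-1)) [])

theorem A_norm (img : List (List (List Int))) : scale3x img =
    (PySem.List.pyRange 0 (PySem.List.len img) 1).flatMap (fun y =>
      [ (PySem.List.pyRange 0 (PySem.List.len (PySem.List.pyGetD img 0 [])) 1).flatMap
          (fun x => (nineA img y x).1),
        (PySem.List.pyRange 0 (PySem.List.len (PySem.List.pyGetD img 0 [])) 1).flatMap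
          (fun x => (nineA img y x).2.1),
        (PySem.List.pyRange 0 (PySem.List.len (PySem.List.pyGetD img 0 [])) 1).flatMap
          (fun x => (nineA img y x).2.2) ]) := by
  unfold scale3x
  simp only [pv_foldl_triple, pv_foldl_app3, List.nil_append]
  apply List.flatMap_congr
  intro y hy
  congr 1
  · apply List.flatMap_congr; intro x hx
    by_cases h : (¬ PySem.List.pyGetD (PySem.List.pyGetD img (max (y-1) 0) []) x [] =
        PySem.List.pyGetD (PySem.List.pyGetD img (min (y+1) ((img.length:Int) - 1)) []) x [] ∧
        ¬ PySem.List.pyGetD (PySem.List.pyGetD img y []) (max (x-1) 0) [] =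
        PySem.List.pyGetD (PySem.List.pyGetD img y []) (min (x+1) (((PySem.List.pyGetD img 0 []).length:Int) - 1)) []) <;> simp [nineA, pvKernelA, h]
  congr 1
  · apply List.flatMap_congr; intro x hx
    by_cases h : (¬ PySem.List.pyGetD (PySem.List.pyGetD img (max (y-1) 0) []) x [] =
        PySem.List.pyGetD (PySem.List.pyGetD img (min (y+1) ((img.length:Int) - 1)) []) x [] ∧
        ¬ PySem.List.pyGetD (PySem.List.pyGetD img y []) (max (x-1) 0) [] =
        PySem.List.pyGetD (PySem.List.pyGetD img y []) (min (x+1) (((PySem.List.pyGetD img 0 []).length:Int) - 1)) []) <;> simp [nineA, pvKernelA, h]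
  congr 1
  apply List.flatMap_congr; intro x hx
  by_cases h : (¬ PySem.List.pyGetD (PySem.List.pyGetD img (max (y-1) 0) []) x [] =
        PySem.List.pyGetD (PySem.List.pyGetD img (min (y+1) ((img.length:Int) - 1)) []) x [] ∧
        ¬ PySem.List.pyGetD (PySem.List.pyGetD img y []) (max (x-1) 0) [] =
        PySem.List.pyGetD (PySem.List.pyGetD img y []) (min (x+1) (((PySem.List.pyGetD img 0 []).length:Int) - 1)) []) <;> simp [nineA, pvKernelA, h]

-- B's rotation kernel equals A's nine-branch kernel (pure propositional reasoning)
theorem pvBlock_eq (A B C D E F G H I : List Int) :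
    pvBlock ((A, B, C), (D, E, F), (G, H, I)) = pvKernelA A B C D E F G H I := by
  by_cases hg : B ≠ H ∧ D ≠ F
  · simp only [pvBlock, pvKernelA, if_pos hg, pvCorner, pvRot]
    have e3 : (if B = F then B else E) = (if B = F then F else E) := by
      split_ifs with h
      · exact h
      · rfl
    have e4 : (if (H = D ∧ E ≠ A) ∨ (D = B ∧ E ≠ G) then D else E)
        = (if (D = B ∧ E ≠ G) ∨ (D = H ∧ E ≠ A) then D else E) := by
      refine if_congr ?_ rfl rfl
      constructor
      · rintro (⟨h1, h2⟩ | ⟨h1, h2⟩)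
        · exact Or.inr ⟨h1.symm, h2⟩
        · exact Or.inl ⟨h1, h2⟩
      · rintro (⟨h1, h2⟩ | ⟨h1, h2⟩)
        · exact Or.inr ⟨h1, h2⟩
        · exact Or.inl ⟨h1.symm, h2⟩
    have e6 : (if (B = F ∧ E ≠ I) ∨ (F = H ∧ E ≠ C) then F else E)
        = (if (B = F ∧ E ≠ I) ∨ (H = F ∧ E ≠ C) then F else E) := by
      refine if_congr ?_ rfl rfl
      constructor
      · rintro (⟨h1, h2⟩ | ⟨h1, h2⟩)
        · exact Or.inl ⟨h1, h2⟩
        · exact Or.inr ⟨h1.symm, h2⟩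
      · rintro (⟨h1, h2⟩ | ⟨h1, h2⟩)
        · exact Or.inl ⟨h1, h2⟩
        · exact Or.inr ⟨h1.symm, h2⟩
    have e7 : (if H = D then H else E) = (if D = H then D else E) := by
      split_ifs with h1 h2 h3
      · exact h1
      · exact absurd h1.symm h2
      · exact absurd h3.symm h1
      · rfl
    have e8 : (if (F = H ∧ E ≠ G) ∨ (H = D ∧ E ≠ I) then H else E)
        = (if (D = H ∧ E ≠ I) ∨ (H = F ∧ E ≠ G) then H else E) := by
      refine if_congr ?_ rfl rfl
      constructor
      · rintro (⟨h1, h2⟩ | ⟨h1, h2⟩)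
        · exact Or.inr ⟨h1.symm, h2⟩
        · exact Or.inl ⟨h1.symm, h2⟩
      · rintro (⟨h1, h2⟩ | ⟨h1, h2⟩)
        · exact Or.inr ⟨h1.symm, h2⟩
        · exact Or.inl ⟨h1.symm, h2⟩
    have e9 : (if F = H then F else E) = (if H = F then F else E) := by
      split_ifs with h1 h2 h3
      · rfl
      · exact absurd h1.symm h2
      · exact absurd h3.symm h1
      · rfl
    rw [e3, e4, e6, e7, e8, e9]
  · simp [pvBlock, pvKernelA, hg]

theorem B_norm (img : List (List (List Int))) : scale3x_alt img =
    (pvWin (img.map (fun row =>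
        PySem.List.slice row none (some (PySem.List.len (PySem.List.pyGetD img 0 [])))))).flatMap
      (fun t =>
        [ (pvZip3 (pvWin t.1) (pvWin t.2.1) (pvWin t.2.2)).flatMap (fun w => (pvBlock w).1),
          (pvZip3 (pvWin t.1) (pvWin t.2.1) (pvWin t.2.2)).flatMap (fun w => (pvBlock w).2.1),
          (pvZip3 (pvWin t.1) (pvWin t.2.1) (pvWin t.2.2)).flatMap (fun w => (pvBlock w).2.2) ]) := by
  unfold scale3x_alt
  simp only [pv_foldl_triple, pv_foldl_app3', List.nil_append]

theorem pvZip3_map {α β₁ β₂ β₃ : Type} (r : List α) (f : α → β₁) (g : α → β₂) (h : α → β₃) :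
    pvZip3 (r.map f) (r.map g) (r.map h) = r.map (fun x => (f x, g x, h x)) := by
  induction r with
  | nil => rfl
  | cons a t ih => simp only [List.map_cons, pvZip3, List.zipWith_cons_cons] at ih ⊢; rw [← ih]

theorem pv_left_eq {α : Type} (seq : List α) (d : α) :
    seq.take 1 ++ seq.dropLast
      = (List.range seq.length).map (fun x => seq.getD (x - 1) d) := by
  apply List.ext_getElem
  · simp; omega
  · intro i hi hi'
    simp only [List.length_map, List.length_range] at hi'
    rw [List.getElem_map, List.getElem_range]
    rcases Nat.eq_zero_or_pos i with h0 | hpos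
    · subst h0
      rw [List.getElem_append_left (by simp [List.length_take]; omega), List.getElem_take,
        List.getD_eq_getElem _ _ (by omega)]
    · rw [List.getElem_append_right (by simp [List.length_take]; omega), List.getElem_dropLast,
        List.getD_eq_getElem _ _ (by omega)]
      congr 1
      simp [List.length_take]
      omega

theorem pv_mid_eq {α : Type} (seq : List α) (d : α) :
    seq = (List.range seq.length).map (fun x => seq.getD x d) := by
  apply List.ext_getElem
  · simp
  · intro i hi hi'
    rw [List.getElem_map, List.getElem_range, List.getD_eq_getElem _ _ hi]

theorem pv_right_eq {α : Type} (seq : List α) (d : α) :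
    seq.tail ++ seq.drop (seq.length - 1)
      = (List.range seq.length).map (fun x => seq.getD (min (x + 1) (seq.length - 1)) d) := by
  apply List.ext_getElem
  · simp
  · intro i hi hi'
    simp only [List.length_map, List.length_range] at hi'
    rw [List.getElem_map, List.getElem_range]
    rcases Nat.lt_or_ge i (seq.length - 1) with hlt | hge
    · rw [List.getElem_append_left (by simp; omega), List.getElem_tail,
        List.getD_eq_getElem _ _ (by omega)]
      congr 1
      omega
    · rw [List.getElem_append_right (by simp; omega), List.getElem_drop,
        List.getD_eq_getElem _ _ (by omega)]
      congr 1
      simp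
      omega

-- pvWin as a map over indices with clamped getD reads
theorem pvWin_eq {α : Type} (seq : List α) (d : α) :
    pvWin seq = (List.range seq.length).map
      (fun x => (seq.getD (x - 1) d, seq.getD x d,
                 seq.getD (min (x + 1) (seq.length - 1)) d)) := by
  unfold pvWin
  rw [PySem.List.slice_to _ (by norm_num : (0:Int) ≤ 1), PySem.List.slice_to_neg_one,
    PySem.List.slice_from_one, PySem.List.slice_from_neg_one]
  have : (1:Int).toNat = 1 := rfl
  rw [this]
  calc pvZip3 (seq.take 1 ++ seq.dropLast) seq (seq.tail ++ seq.drop (seq.length - 1))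
      = pvZip3 ((List.range seq.length).map (fun x => seq.getD (x - 1) d))
          ((List.range seq.length).map (fun x => seq.getD x d))
          ((List.range seq.length).map
            (fun x => seq.getD (min (x + 1) (seq.length - 1)) d)) := by
        rw [← pv_left_eq seq d, ← pv_right_eq seq d]
        congr 1
        exact pv_mid_eq seq d
    _ = _ := pvZip3_map _ _ _ _

set_option maxHeartbeats 1000000 in
theorem pv_main (R0 : List (List Int)) (rest : List (List (List Int)))
    (hrows : ∀ r ∈ R0 :: rest, R0.length ≤ r.length) :
    scale3x (R0 :: rest) = scale3x_alt (R0 :: rest) := by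
  classical
  set img := R0 :: rest with himg
  set Y : Nat := img.length with hY
  set X : Nat := R0.length with hX
  have hY0 : 0 < Y := by rw [hY, himg]; simp
  -- grid and its rows
  have hXint : PySem.List.len (PySem.List.pyGetD img 0 []) = (X : Int) := by
    rw [himg, PySem.List.pyGetD_zero_cons, PySem.List.len_eq]
  have hgrid : img.map (fun row =>
      PySem.List.slice row none (some (PySem.List.len (PySem.List.pyGetD img 0 []))))
      = img.map (fun row => row.take X) := by
    rw [hXint]
    exact List.map_congr_left (fun r _ => PySem.List.slice_to_natCast r X)
  set grid := img.map (fun row => row.take X) with hg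
  have hglen : grid.length = Y := by simp [hg, hY]
  have hrowlen : ∀ k, (hk : k < Y) → (grid[k]'(by omega)).length = X := by
    intro k hk
    have := hrows (img[k]'(by omega)) (List.getElem_mem (by omega))
    simp [hg, List.length_take]
    omega
  have hrowD : ∀ k, k < Y → (grid.getD k []).length = X := by
    intro k hk
    rw [List.getD_eq_getElem _ _ (by omega)]
    exact hrowlen k hk
  -- pixel read equality: grid row element = A's clamped img read
  have hpix : ∀ (k j : Nat), k < Y → j < X →
      (grid.getD k []).getD j [] = (img.getD k []).getD j [] := by
    intro k j hk hj
    rw [List.getD_eq_getElem _ _ (by omega : k < grid.length),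
        List.getD_eq_getElem _ _ (by omega : k < img.length)]
    have hjl : j < (img[k]'(by omega)).length := by
      have := hrows (img[k]'(by omega)) (List.getElem_mem (by omega))
      omega
    have : grid[k]'(by omega) = (img[k]'(by omega)).take X := by simp [hg]
    rw [this, List.getD_eq_getElem _ _ (by simp [List.length_take]; omega),
        List.getD_eq_getElem _ _ hjl, List.getElem_take]
  -- Int↔Nat read bridges for A's four clamped indices
  have hclampO : ∀ (k : Nat), k < Y →
      (max ((k:Int) - 1) 0 = ((k - 1 : Nat) : Int)
        ∧ min ((k:Int) + 1) ((Y:Int) - 1) = ((min (k + 1) (Y - 1) : Nat) : Int)) := by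
    intro k hk; constructor <;> omega
  have hreadA : ∀ (i : Int) (j : Int) (ni nj : Nat), i = (ni:Int) → j = (nj:Int) →
      PySem.List.pyGetD (PySem.List.pyGetD img i []) j []
        = (img.getD ni []).getD nj [] := by
    intro i j ni nj hi hj
    rw [hi, hj, PySem.List.pyGetD_natCast, PySem.List.pyGetD_natCast]
  -- now rewrite both sides
  rw [A_norm, B_norm, hgrid, pvWin_eq grid ([] : List (List Int)), hglen]
  rw [List.flatMap_map]
  simp only [hXint]
  rw [show (PySem.List.len img) = (Y:Int) by rw [PySem.List.len_eq, hY]]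
  rw [PySem.List.pyRange_one 0 (Y:Int), show ((Y:Int) - 0).toNat = Y by omega,
    List.flatMap_map]
  apply List.flatMap_congr
  intro k hk'
  have hk : k < Y := List.mem_range.mp hk'
  -- the three window rows for this k
  have hup : (grid.getD (k - 1) []).length = X := hrowD _ (by omega)
  have hmid : (grid.getD k []).length = X := hrowD _ hk
  have hdn : (grid.getD (min (k + 1) (Y - 1)) []).length = X := hrowD _ (by omega)
  rw [pvWin_eq (grid.getD (k - 1) []) ([] : List Int),
      pvWin_eq (grid.getD k []) ([] : List Int),
      pvWin_eq (grid.getD (min (k + 1) (Y - 1)) []) ([] : List Int),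
      hup, hmid, hdn, pvZip3_map]
  rw [PySem.List.pyRange_one 0 (X:Int), show ((X:Int) - 0).toNat = X by omega]
  simp only [List.flatMap_map, zero_add]
  have hnine : ∀ j ∈ List.range X,
      nineA img ((k:Int)) ((j:Int))
        = pvBlock
            (((grid.getD (k-1) []).getD (j-1) [], (grid.getD (k-1) []).getD j [],
              (grid.getD (k-1) []).getD (min (j+1) (X-1)) []),
             ((grid.getD k []).getD (j-1) [], (grid.getD k []).getD j [],
              (grid.getD k []).getD (min (j+1) (X-1)) []),
             ((grid.getD (min (k+1) (Y-1)) []).getD (j-1) [],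
              (grid.getD (min (k+1) (Y-1)) []).getD j [],
              (grid.getD (min (k+1) (Y-1)) []).getD (min (j+1) (X-1)) [])) := by
    intro j hj'
    have hj : j < X := List.mem_range.mp hj'
    rw [pvBlock_eq]
    unfold nineA
    simp only [hXint]
    rw [show (PySem.List.len img) = (Y:Int) by rw [PySem.List.len_eq, hY]]
    rw [hreadA (max ((k:Int)-1) 0) (max ((j:Int)-1) 0) (k-1) (j-1) (by omega) (by omega),
        hreadA (max ((k:Int)-1) 0) ((j:Int)) (k-1) j (by omega) rfl,
        hreadA (max ((k:Int)-1) 0) (min ((j:Int)+1) ((X:Int)-1)) (k-1) (min (j+1) (X-1)) (by omega) (by omega),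
        hreadA ((k:Int)) (max ((j:Int)-1) 0) k (j-1) rfl (by omega),
        hreadA ((k:Int)) ((j:Int)) k j rfl rfl,
        hreadA ((k:Int)) (min ((j:Int)+1) ((X:Int)-1)) k (min (j+1) (X-1)) rfl (by omega),
        hreadA (min ((k:Int)+1) ((Y:Int)-1)) (max ((j:Int)-1) 0) (min (k+1) (Y-1)) (j-1) (by omega) (by omega),
        hreadA (min ((k:Int)+1) ((Y:Int)-1)) ((j:Int)) (min (k+1) (Y-1)) j (by omega) rfl,
        hreadA (min ((k:Int)+1) ((Y:Int)-1)) (min ((j:Int)+1) ((X:Int)-1)) (min (k+1) (Y-1)) (min (j+1) (X-1)) (by omega) (by omega)]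
    rw [hpix (k-1) (j-1) (by omega) (by omega), hpix (k-1) j (by omega) hj,
        hpix (k-1) (min (j+1) (X-1)) (by omega) (by omega),
        hpix k (j-1) hk (by omega), hpix k j hk hj,
        hpix k (min (j+1) (X-1)) hk (by omega),
        hpix (min (k+1) (Y-1)) (j-1) (by omega) (by omega),
        hpix (min (k+1) (Y-1)) j (by omega) hj,
        hpix (min (k+1) (Y-1)) (min (j+1) (X-1)) (by omega) (by omega)]
  refine congrArg₂ (· :: ·) ?_ (congrArg₂ (· :: ·) ?_ (congrArg₂ (· :: ·) ?_ rfl)) <;>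
    exact List.flatMap_congr fun j hj => by rw [hnine j hj]

-- ===== VERDICT (by name: the statement is the Claim_ definition above) =====
theorem scale3x_spec : Claim_equal_scale3x := by
  intro img _hdom hpre
  obtain ⟨hne, hrows⟩ := hpre
  cases img with
  | nil => exact absurd rfl hne
  | cons R0 rest =>
    show scale3x _ = scale3x_alt _
    exact pv_main R0 rest (by simpa using hrows)
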